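-- pv_equiv track=rewrite | github.com/Ravi123pashchapur/ravagentic | src/orchestrator/paused_runner.py | targeted_step_keys
-- ===== SOURCE A (Python) =====
-- from typing import Any, Dict, List, Tuple
--
-- def targeted_step_keys(failed_gates: List[str]) -> List[str]:
--     dependency_chain = ["test", "security", "performance", "contract", "release", "observability"]
--
--     keys = {"build"}
--     for gate in failed_gates:
--         if gate in dependency_chain:
--             idx = dependency_chain.index(gate)
--             keys.update(dependency_chain[idx:])
--
--     ordered = ["build"] + [g for g in dependency_chain if g in keys]
--     return ordered
-- ===== SOURCE B (Python) =====
-- def targeted_step_keys(failed_gates):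
--     dependency_chain = ["test", "security", "performance", "contract", "release", "observability"]
--
--     min_idx = None
--     for gate in failed_gates:
--         if gate in dependency_chain:
--             i = dependency_chain.index(gate)
--             if min_idx is None or i < min_idx:
--                 min_idx = i
--
--     if min_idx is None:
--         return ["build"]
--     return ["build"] + dependency_chain[min_idx:]
-- ===== Notes on version B (the rewrite author's own statement) =====
-- stated objective: simpler
-- what changed: Instead of accumulating a set of chain suffixes and then filtering the chain through it, B tracks only the minimum chain index among failed gates and returns the build step followed by one slice of the chain (the slice is empty-omitted when no gate lies in the chain).
import Mathlib
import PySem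

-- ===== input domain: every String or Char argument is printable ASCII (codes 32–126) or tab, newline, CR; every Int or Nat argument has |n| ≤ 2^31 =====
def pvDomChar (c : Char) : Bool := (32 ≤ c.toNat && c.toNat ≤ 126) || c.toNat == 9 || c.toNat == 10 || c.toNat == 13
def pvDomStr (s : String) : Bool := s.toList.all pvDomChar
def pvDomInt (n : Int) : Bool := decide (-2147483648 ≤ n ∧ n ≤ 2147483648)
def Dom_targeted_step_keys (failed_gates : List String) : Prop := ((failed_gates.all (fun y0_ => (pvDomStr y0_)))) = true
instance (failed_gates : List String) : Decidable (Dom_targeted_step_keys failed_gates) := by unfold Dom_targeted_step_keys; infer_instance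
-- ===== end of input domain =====

-- B maintains only the minimum chain index of a failed gate and emits one slice,
-- instead of A's set of suffixes plus a final filter pass (objective: simpler).

-- ===== PORT A =====
def targeted_step_keys (failed_gates : List String) : List String :=
  let dependency_chain : List String :=
    ["test", "security", "performance", "contract", "release", "observability"]
  let keys : PySem.Set String :=
    failed_gates.foldl (fun keys gate =>
      if gate ∈ dependency_chain then
        match PySem.List.index? dependency_chain gate with
        | some idx => PySem.Set.update keys (PySem.List.slice dependency_chain (some (idx : Int)) none)
        | none => keys   -- unreachable: guarded by the membership test
      else keys) (PySem.Set.ofList ["build"])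
  ["build"] ++ dependency_chain.filter (fun g => g ∈ keys)

-- ===== PORT B =====
def targeted_step_keys_alt (failed_gates : List String) : List String :=
  let dependency_chain : List String :=
    ["test", "security", "performance", "contract", "release", "observability"]
  let min_idx : Option Nat :=
    failed_gates.foldl (fun min_idx gate =>
      if gate ∈ dependency_chain then
        match PySem.List.index? dependency_chain gate with
        | some i =>
          match min_idx with
          | none => some i
          | some j => if i < j then some i else some j
        | none => min_idx   -- unreachable: guarded by the membership test
      else min_idx) none
  match min_idx with
  | none => ["build"]
  | some i => ["build"] ++ PySem.List.slice dependency_chain (some (i : Int)) none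

-- ===== PRECONDITION & SPEC =====
def Spec_targeted_step_keys (failed_gates : List String) (out : List String) : Prop := out = targeted_step_keys_alt failed_gates
instance (failed_gates : List String) (out : List String) : Decidable (Spec_targeted_step_keys failed_gates out) := by unfold Spec_targeted_step_keys; infer_instance

-- ===== CLAIM (what is proved, stated in full; the proofs are below) =====
def Claim_equal_targeted_step_keys : Prop := ∀ (failed_gates : List String), Dom_targeted_step_keys failed_gates → Spec_targeted_step_keys failed_gates (targeted_step_keys failed_gates)

-- ===== LEMMAS AND PROOFS =====

def pvChain : List String :=
  ["test", "security", "performance", "contract", "release", "observability"]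

-- the two loop bodies, named for the proofs (definitionally the lambdas in the ports)
def pvStepA (keys : PySem.Set String) (gate : String) : PySem.Set String :=
  if gate ∈ pvChain then
    match PySem.List.index? pvChain gate with
    | some idx => PySem.Set.update keys (PySem.List.slice pvChain (some (idx : Int)) none)
    | none => keys
  else keys

def pvStepB (min_idx : Option Nat) (gate : String) : Option Nat :=
  if gate ∈ pvChain then
    match PySem.List.index? pvChain gate with
    | some i =>
      match min_idx with
      | none => some i
      | some j => if i < j then some i else some j
    | none => min_idx
  else min_idx

-- encode B's Option accumulator as an index in [0,6] (none ↦ 6)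
def pvIdx : Option Nat → Nat
  | none => 6
  | some j => j

-- the invariant linking A's set to B's minimum index
def pvInv (keys : PySem.Set String) (m : Option Nat) : Prop :=
  pvIdx m ≤ 6 ∧ ∀ g : String, g ∈ keys ↔ g = "build" ∨ g ∈ pvChain.drop (pvIdx m)

theorem pv_drop_subset_of_le {α : Type} (l : List α) {i j : Nat} (h : i ≤ j) :
    l.drop j ⊆ l.drop i := by
  have heq : l.drop j = (l.drop i).drop (j - i) := by
    rw [List.drop_drop]; congr 1; omega
  rw [heq]; exact List.drop_subset _ _

theorem pv_mem_drop_min {α : Type} (l : List α) (g : α) (i j : Nat) :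
    (g ∈ l.drop j ∨ g ∈ l.drop i) ↔ g ∈ l.drop (min i j) := by
  constructor
  · rintro (h | h)
    · exact pv_drop_subset_of_le l (Nat.min_le_right i j) h
    · exact pv_drop_subset_of_le l (Nat.min_le_left i j) h
  · intro h
    rcases Nat.le_total i j with hle | hle
    · right; rwa [Nat.min_eq_left hle] at h
    · left; rwa [Nat.min_eq_right hle] at h

theorem pv_inv_init : pvInv (PySem.Set.ofList ["build"]) none := by
  constructor
  · simp [pvIdx]
  · intro g
    simp [PySem.Set.mem_ofList, pvChain, pvIdx]

theorem pv_inv_step (keys : PySem.Set String) (m : Option Nat) (gate : String)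
    (h : pvInv keys m) : pvInv (pvStepA keys gate) (pvStepB m gate) := by
  obtain ⟨hm6, hmem⟩ := h
  unfold pvStepA pvStepB
  by_cases hg : gate ∈ pvChain
  · simp only [if_pos hg]
    obtain ⟨i, hi⟩ := Option.isSome_iff_exists.mp
      ((PySem.List.index?_isSome_iff (xs := pvChain) (v := gate)).2 hg)
    have hi6 : i < 6 := by
      obtain ⟨hk, -, -⟩ := PySem.List.getElem_of_index?_eq_some hi
      simpa [pvChain] using hk
    rw [hi]
    have hgoal : ∀ (m' : Option Nat), pvIdx m' = min i (pvIdx m) →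
        pvInv (PySem.Set.update keys (PySem.List.slice pvChain (some (i : Int)) none)) m' := by
      intro m' hm'
      rw [PySem.List.slice_from_natCast]
      refine ⟨by omega, fun g => ?_⟩
      rw [PySem.Set.mem_update, hmem, hm', or_assoc,
        pv_mem_drop_min pvChain g i (pvIdx m)]
    cases m with
    | none =>
      exact hgoal (some i) (by simp [pvIdx]; omega)
    | some j =>
      by_cases hij : i < j
      · show pvInv _ (if i < j then some i else some j)
        rw [if_pos hij]
        exact hgoal (some i) (by simp [pvIdx]; omega)
      · show pvInv _ (if i < j then some i else some j)
        rw [if_neg hij]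
        exact hgoal (some j) (by simp [pvIdx]; omega)
  · simpa [hg] using And.intro hm6 hmem

theorem pv_inv_fold (failed_gates : List String) :
    ∀ (keys : PySem.Set String) (m : Option Nat), pvInv keys m →
      pvInv (failed_gates.foldl pvStepA keys) (failed_gates.foldl pvStepB m) := by
  induction failed_gates with
  | nil => intro keys m h; exact h
  | cons gate rest ih =>
    intro keys m h
    exact ih _ _ (pv_inv_step keys m gate h)

theorem pv_filter_eq (keys : PySem.Set String) (j : Nat) (hj : j ≤ 6)
    (hmem : ∀ g : String, g ∈ keys ↔ g = "build" ∨ g ∈ pvChain.drop j) :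
    pvChain.filter (fun g => g ∈ keys) = pvChain.drop j := by
  have hcongr : pvChain.filter (fun g => g ∈ keys)
      = pvChain.filter (fun g => decide (g = "build" ∨ g ∈ pvChain.drop j)) := by
    refine List.filter_congr ?_
    intro g _
    simp [hmem g]
  rw [hcongr]
  interval_cases j <;> simp [pvChain]

-- ===== VERDICT (by name: the statement is the Claim_ definition above) =====
theorem targeted_step_keys_spec : Claim_equal_targeted_step_keys := by
  intro failed_gates _
  show targeted_step_keys failed_gates = targeted_step_keys_alt failed_gates
  have h := pv_inv_fold failed_gates (PySem.Set.ofList ["build"]) none pv_inv_init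
  show (["build"] ++ pvChain.filter
      (fun g => g ∈ failed_gates.foldl pvStepA (PySem.Set.ofList ["build"])))
    = (match failed_gates.foldl pvStepB none with
       | none => ["build"]
       | some i => ["build"] ++ PySem.List.slice pvChain (some (i : Int)) none)
  obtain ⟨hj, hmem⟩ := h
  rw [pv_filter_eq _ (pvIdx (failed_gates.foldl pvStepB none)) hj hmem]
  cases hm : failed_gates.foldl pvStepB none with
  | none => simp [pvIdx, pvChain]
  | some i =>
    show _ = ["build"] ++ PySem.List.slice pvChain (some (i : Int)) none
    rw [PySem.List.slice_from_natCast]; simp [pvIdx]
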